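-- pv_equiv track=rewrite | github.com/E-Doggo/ProyectoCalidad | utils.py | move_east
-- ===== SOURCE A (Python) =====
-- def move_east(new_board, row_copy, col_copy, previous_position, player):
--     for n in range(1, 4 - col_copy):
--         if col_copy + n < 4:
--             if new_board[row_copy][col_copy + n] is not None:
--                 break
--             new_board[row_copy][col_copy + n] = player
--             new_board[previous_position[0]][previous_position[1]] = None
--             previous_position = [row_copy, col_copy + n]
--     return new_board
-- ===== SOURCE B (Python) =====
-- def move_east(new_board, row_copy, col_copy, previous_position, player):
--     # Scan east over the original board to find the furthest empty column,
--     # then do a single post-loop update (no mutation inside the scan).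
--     target = col_copy
--     col = col_copy + 1
--     while col < 4 and new_board[row_copy][col] is None:
--         target = col
--         col += 1
--     if target != col_copy:
--         new_board[row_copy][target] = player
--         new_board[previous_position[0]][previous_position[1]] = None
--     return new_board
-- ===== Notes on version B (the rewrite author's own statement) =====
-- stated objective: simpler
-- what changed: B replaces A's mutate-as-you-scan loop (which writes the player into every intermediate cell, clears it again and re-tracks previous_position each step) by a read-only scan for the furthest empty column followed by a single set and a single clear after the loop.
import Mathlib
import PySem

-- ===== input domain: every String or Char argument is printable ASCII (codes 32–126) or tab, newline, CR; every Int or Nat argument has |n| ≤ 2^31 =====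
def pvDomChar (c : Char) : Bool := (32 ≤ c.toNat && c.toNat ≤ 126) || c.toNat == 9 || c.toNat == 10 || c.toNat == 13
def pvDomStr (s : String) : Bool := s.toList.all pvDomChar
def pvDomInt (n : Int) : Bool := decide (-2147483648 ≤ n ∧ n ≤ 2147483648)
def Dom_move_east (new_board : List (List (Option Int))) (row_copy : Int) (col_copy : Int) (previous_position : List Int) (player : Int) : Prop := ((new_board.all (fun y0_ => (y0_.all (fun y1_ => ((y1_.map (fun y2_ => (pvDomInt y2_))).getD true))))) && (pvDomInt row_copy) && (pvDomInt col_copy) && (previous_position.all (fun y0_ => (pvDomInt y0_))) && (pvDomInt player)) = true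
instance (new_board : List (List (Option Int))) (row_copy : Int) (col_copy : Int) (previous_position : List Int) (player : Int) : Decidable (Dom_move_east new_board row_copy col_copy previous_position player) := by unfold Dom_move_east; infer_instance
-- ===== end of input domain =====

-- B moves all board mutation out of the scan loop: it first finds the furthest reachable
-- empty column, then performs one set/one clear (objective: simpler). Both A and B mutate
-- new_board in place in Python; the equivalence proved here is about the return value.

-- ===== PORT A =====
-- A's for-loop over range(1, 4 - col_copy) with break, carrying the mutated board and
-- previous_position as state.  Where Python would raise IndexError (pyGet? = none) the
-- port returns the current board; such inputs are excluded by Pre_move_east.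
def pvMoveEastLoopA (ns : List Int) (board : List (List (Option Int))) (row_copy col_copy : Int) (prev : List Int) (player : Int) : List (List (Option Int)) :=
  match ns with
  | [] => board
  | n :: rest =>
    if col_copy + n < 4 then
      match PySem.List.pyGet? board row_copy with
      | none => board
      | some row =>
        match PySem.List.pyGet? row (col_copy + n) with
        | none => board
        | some cell =>
          if cell.isSome then board  -- `break`
          else
            let board1 := PySem.List.pySetD board row_copy (PySem.List.pySetD row (col_copy + n) (some player))
            match PySem.List.pyGet? prev 0, PySem.List.pyGet? prev 1 with
            | some p0, some p1 =>
              match PySem.List.pyGet? board1 p0 with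
              | none => board1
              | some prow =>
                pvMoveEastLoopA rest (PySem.List.pySetD board1 p0 (PySem.List.pySetD prow p1 none)) row_copy col_copy [row_copy, col_copy + n] player
            | _, _ => board1
    else pvMoveEastLoopA rest board row_copy col_copy prev player

def move_east (new_board : List (List (Option Int))) (row_copy : Int) (col_copy : Int) (previous_position : List Int) (player : Int) : List (List (Option Int)) :=
  pvMoveEastLoopA (PySem.List.pyRange 1 (4 - col_copy) 1) new_board row_copy col_copy previous_position player

-- ===== PORT B =====
-- B's while-loop: scan east over the (unchanged) board while cells are empty, tracking
-- the furthest empty column `target`.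
def pvMoveEastScanB (board : List (List (Option Int))) (row_copy col target : Int) : Int :=
  if _h : col < 4 then
    match (PySem.List.pyGet? board row_copy).bind (fun row => PySem.List.pyGet? row col) with
    | some none => pvMoveEastScanB board row_copy (col + 1) col
    | _ => target
  else target
termination_by (4 - col).toNat
decreasing_by omega

def move_east_alt (new_board : List (List (Option Int))) (row_copy : Int) (col_copy : Int) (previous_position : List Int) (player : Int) : List (List (Option Int)) :=
  let target := pvMoveEastScanB new_board row_copy (col_copy + 1) col_copy
  if target ≠ col_copy then
    let board1 :=
      match PySem.List.pyGet? new_board row_copy with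
      | some row => PySem.List.pySetD new_board row_copy (PySem.List.pySetD row target (some player))
      | none => new_board
    match PySem.List.pyGet? previous_position 0, PySem.List.pyGet? previous_position 1 with
    | some p0, some p1 =>
      match PySem.List.pyGet? board1 p0 with
      | some prow => PySem.List.pySetD board1 p0 (PySem.List.pySetD prow p1 none)
      | none => board1
    | _, _ => board1
  else new_board

-- ===== PRECONDITION & SPEC =====
-- Pre_ restricts to the game's natural domain: either the scan is empty (col_copy ≥ 3), or
-- row_copy/col_copy are plain in-range indices and either the first scanned cell exists and
-- is occupied (no write happens, previous_position untouched) or the row has length ≥ 4 and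
-- previous_position is the player's current cell [row_copy, col_copy].  Excluded (A still returns on some of them): negative /
-- wrapping indices and calls where previous_position points elsewhere — there A's in-place
-- clearing of previous_position mid-scan can reopen a cell the scan then walks through,
-- an artefact of A's mutation order.
def Pre_move_east (new_board : List (List (Option Int))) (row_copy : Int) (col_copy : Int) (previous_position : List Int) (player : Int) : Prop :=
  3 ≤ col_copy ∨
  (0 ≤ row_copy ∧ row_copy < new_board.length ∧ 0 ≤ col_copy ∧ col_copy < 3 ∧
   (((col_copy + 1).toNat < (new_board.getD row_copy.toNat []).length ∧
     (new_board.getD row_copy.toNat []).getD (col_copy + 1).toNat none ≠ none) ∨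
    (4 ≤ (new_board.getD row_copy.toNat []).length ∧
     previous_position = [row_copy, col_copy])))
instance (new_board : List (List (Option Int))) (row_copy : Int) (col_copy : Int) (previous_position : List Int) (player : Int) : Decidable (Pre_move_east new_board row_copy col_copy previous_position player) := by unfold Pre_move_east; infer_instance

def pvWitness_move_east : List (List (Option Int)) × Int × Int × List Int × Int :=
  ([[some 7, none, none, none], [none, none, none, none]], 0, 0, [0, 0], 7)

def Spec_move_east (new_board : List (List (Option Int))) (row_copy : Int) (col_copy : Int) (previous_position : List Int) (player : Int) (out : List (List (Option Int))) : Prop := out = move_east_alt new_board row_copy col_copy previous_position player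
instance (new_board : List (List (Option Int))) (row_copy : Int) (col_copy : Int) (previous_position : List Int) (player : Int) (out : List (List (Option Int))) : Decidable (Spec_move_east new_board row_copy col_copy previous_position player out) := by unfold Spec_move_east; infer_instance

-- ===== CLAIM (what is proved, stated in full; the proofs are below) =====
def Claim_equal_move_east : Prop := ∀ (new_board : List (List (Option Int))) (row_copy : Int) (col_copy : Int) (previous_position : List Int) (player : Int), Dom_move_east new_board row_copy col_copy previous_position player → Pre_move_east new_board row_copy col_copy previous_position player → Spec_move_east new_board row_copy col_copy previous_position player (move_east new_board row_copy col_copy previous_position player)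

-- ===== LEMMAS AND PROOFS =====
theorem pvGG0 {α : Type} (x0 : α) (l : List α) : PySem.List.pyGet? (x0::l) 0 = some x0 := by
  simp [PySem.List.pyGet?, PySem.List.pyIdx?]
theorem pvGG1 {α : Type} (x0 x1 : α) (l : List α) : PySem.List.pyGet? (x0::x1::l) 1 = some x1 := by
  simp [PySem.List.pyGet?, PySem.List.pyIdx?]
theorem pvGG2 {α : Type} (x0 x1 x2 : α) (l : List α) : PySem.List.pyGet? (x0::x1::x2::l) 2 = some x2 := by
  rw [show (2:Int) = ((2:Nat):Int) from rfl, PySem.List.pyGet?_natCast]; simp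
theorem pvGG3 {α : Type} (x0 x1 x2 x3 : α) (l : List α) : PySem.List.pyGet? (x0::x1::x2::x3::l) 3 = some x3 := by
  rw [show (3:Int) = ((3:Nat):Int) from rfl, PySem.List.pyGet?_natCast]; simp
theorem pvSD0 {α : Type} (x0 : α) (l : List α) (v : α) : PySem.List.pySetD (x0::l) 0 v = v::l := by
  simp [PySem.List.pySetD, PySem.List.pySet?, PySem.List.pyIdx?]
theorem pvSD1 {α : Type} (x0 x1 : α) (l : List α) (v : α) : PySem.List.pySetD (x0::x1::l) 1 v = x0::v::l := by
  simp [PySem.List.pySetD, PySem.List.pySet?, PySem.List.pyIdx?]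
theorem pvSD2 {α : Type} (x0 x1 x2 : α) (l : List α) (v : α) : PySem.List.pySetD (x0::x1::x2::l) 2 v = x0::x1::v::l := by
  rw [show (2:Int) = ((2:Nat):Int) from rfl, PySem.List.pySetD_natCast]; simp [List.set]
theorem pvSD3 {α : Type} (x0 x1 x2 x3 : α) (l : List α) (v : α) : PySem.List.pySetD (x0::x1::x2::x3::l) 3 v = x0::x1::x2::v::l := by
  rw [show (3:Int) = ((3:Nat):Int) from rfl, PySem.List.pySetD_natCast]; simp [List.set]

theorem pvCaseHigh (board : List (List (Option Int))) (rc cc : Int) (prev : List Int) (player : Int)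
    (h3 : 3 ≤ cc) :
    move_east board rc cc prev player = move_east_alt board rc cc prev player := by
  have hrange : PySem.List.pyRange 1 (4-cc) 1 = [] := by simp [PySem.List.pyRange]; omega
  have hscan : pvMoveEastScanB board rc (cc+1) cc = cc := by
    rw [pvMoveEastScanB]; simp; omega
  unfold move_east move_east_alt
  rw [hrange, hscan]
  simp [pvMoveEastLoopA]

theorem pvCaseBlocked (board : List (List (Option Int))) (i : Nat) (cc : Int) (prev : List Int) (player : Int)
    (hi : i < board.length)
    (a b c d : Option Int) (t : List (Option Int)) (hrow : board[i] = a::b::c::d::t)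
    (hcc : cc = 0 ∧ b.isSome ∨ cc = 1 ∧ c.isSome ∨ cc = 2 ∧ d.isSome) :
    move_east board (i:Int) cc prev player = move_east_alt board (i:Int) cc prev player := by
  have hget : PySem.List.pyGet? board (i:Int) = some (a::b::c::d::t) := by
    simp [PySem.List.pyGet?_natCast, List.getElem?_eq_getElem hi, hrow]
  rcases hcc with ⟨rfl, hb⟩ | ⟨rfl, hb⟩ | ⟨rfl, hb⟩
  · have hrange : PySem.List.pyRange 1 (4-0) 1 = [1,2,3] := by decide
    have hscan : pvMoveEastScanB board (i:Int) (0+1) 0 = 0 := by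
      rw [pvMoveEastScanB]
      rcases b with _|bv; · simp at hb
      norm_num [hget, pvGG1]
    unfold move_east move_east_alt
    rw [hrange, hscan]
    rcases b with _|bv; · simp at hb
    norm_num [pvMoveEastLoopA, hget, pvGG1]
  · have hrange : PySem.List.pyRange 1 (4-1) 1 = [1,2] := by decide
    have hscan : pvMoveEastScanB board (i:Int) (1+1) 1 = 1 := by
      rw [pvMoveEastScanB]
      rcases c with _|cv; · simp at hb
      norm_num [hget, pvGG2]
    unfold move_east move_east_alt
    rw [hrange, hscan]
    rcases c with _|cv; · simp at hb
    norm_num [pvMoveEastLoopA, hget, pvGG2]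
  · have hrange : PySem.List.pyRange 1 (4-2) 1 = [1] := by decide
    have hscan : pvMoveEastScanB board (i:Int) (2+1) 2 = 2 := by
      rw [pvMoveEastScanB]
      rcases d with _|dv; · simp at hb
      norm_num [hget, pvGG3]
    unfold move_east move_east_alt
    rw [hrange, hscan]
    rcases d with _|dv; · simp at hb
    norm_num [pvMoveEastLoopA, hget, pvGG3]

theorem pvCaseMain (board : List (List (Option Int))) (i : Nat) (cc : Int) (player : Int)
    (hi : i < board.length)
    (a b c d : Option Int) (t : List (Option Int)) (hrow : board[i] = a::b::c::d::t)
    (hcc : cc = 0 ∨ cc = 1 ∨ cc = 2) :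
    move_east board (i:Int) cc [(i:Int), cc] player = move_east_alt board (i:Int) cc [(i:Int), cc] player := by
  have hget : PySem.List.pyGet? board (i:Int) = some (a::b::c::d::t) := by
    simp [PySem.List.pyGet?_natCast, List.getElem?_eq_getElem hi, hrow]
  have hgetset : ∀ (R : List (Option Int)), PySem.List.pyGet? (PySem.List.pySetD board (i:Int) R) (i:Int) = some R := by
    intro R
    simp [PySem.List.pySetD_natCast, PySem.List.pyGet?_natCast, hi]
  have hsetset : ∀ (R S : List (Option Int)), PySem.List.pySetD (PySem.List.pySetD board (i:Int) R) (i:Int) S = PySem.List.pySetD board (i:Int) S := by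
    intro R S; simp [PySem.List.pySetD_natCast, List.set_set]
  rcases hcc with rfl | rfl | rfl
  · rcases b with _|bv
    · rcases c with _|cv
      · rcases d with _|dv
        · have hscan : pvMoveEastScanB board (i:Int) (0+1) 0 = 3 := by
            rw [pvMoveEastScanB, pvMoveEastScanB, pvMoveEastScanB, pvMoveEastScanB]
            norm_num [hget, hrow, pvGG1, pvGG2, pvGG3]
          unfold move_east move_east_alt
          rw [show PySem.List.pyRange 1 (4-0) 1 = [1,2,3] from by decide, hscan]
          norm_num [pvMoveEastLoopA, hget, hgetset, hsetset, pvGG0, pvGG1, pvGG2, pvGG3, pvSD0, pvSD1, pvSD2, pvSD3, hi, hrow, List.getElem?_set_self, List.set_set]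
        · have hscan : pvMoveEastScanB board (i:Int) (0+1) 0 = 2 := by
            rw [pvMoveEastScanB, pvMoveEastScanB, pvMoveEastScanB]
            norm_num [hget, hrow, pvGG1, pvGG2, pvGG3]
          unfold move_east move_east_alt
          rw [show PySem.List.pyRange 1 (4-0) 1 = [1,2,3] from by decide, hscan]
          norm_num [pvMoveEastLoopA, hget, hgetset, hsetset, pvGG0, pvGG1, pvGG2, pvGG3, pvSD0, pvSD1, pvSD2, pvSD3, hi, hrow, List.getElem?_set_self, List.set_set]
      · have hscan : pvMoveEastScanB board (i:Int) (0+1) 0 = 1 := by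
          rw [pvMoveEastScanB, pvMoveEastScanB]
          norm_num [hget, hrow, pvGG1, pvGG2]
        unfold move_east move_east_alt
        rw [show PySem.List.pyRange 1 (4-0) 1 = [1,2,3] from by decide, hscan]
        norm_num [pvMoveEastLoopA, hget, hgetset, hsetset, pvGG0, pvGG1, pvGG2, pvGG3, pvSD0, pvSD1, pvSD2, pvSD3, hi, hrow, List.getElem?_set_self, List.set_set]
    · exact pvCaseBlocked board i 0 [(i:Int), 0] player hi a (some bv) c d t hrow (Or.inl ⟨rfl, rfl⟩)
  · rcases c with _|cv
    · rcases d with _|dv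
      · have hscan : pvMoveEastScanB board (i:Int) (1+1) 1 = 3 := by
          rw [pvMoveEastScanB, pvMoveEastScanB, pvMoveEastScanB]
          norm_num [hget, hrow, pvGG2, pvGG3]
        unfold move_east move_east_alt
        rw [show PySem.List.pyRange 1 (4-1) 1 = [1,2] from by decide, hscan]
        norm_num [pvMoveEastLoopA, hget, hgetset, hsetset, pvGG0, pvGG1, pvGG2, pvGG3, pvSD0, pvSD1, pvSD2, pvSD3, hi, hrow, List.getElem?_set_self, List.set_set]
      · have hscan : pvMoveEastScanB board (i:Int) (1+1) 1 = 2 := by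
          rw [pvMoveEastScanB, pvMoveEastScanB]
          norm_num [hget, hrow, pvGG2, pvGG3]
        unfold move_east move_east_alt
        rw [show PySem.List.pyRange 1 (4-1) 1 = [1,2] from by decide, hscan]
        norm_num [pvMoveEastLoopA, hget, hgetset, hsetset, pvGG0, pvGG1, pvGG2, pvGG3, pvSD0, pvSD1, pvSD2, pvSD3, hi, hrow, List.getElem?_set_self, List.set_set]
    · exact pvCaseBlocked board i 1 [(i:Int), 1] player hi a b (some cv) d t hrow (Or.inr (Or.inl ⟨rfl, rfl⟩))
  · rcases d with _|dv
    · have hscan : pvMoveEastScanB board (i:Int) (2+1) 2 = 3 := by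
        rw [pvMoveEastScanB, pvMoveEastScanB]
        norm_num [hget, hrow, pvGG3]
      unfold move_east move_east_alt
      rw [show PySem.List.pyRange 1 (4-2) 1 = [1] from by decide, hscan]
      norm_num [pvMoveEastLoopA, hget, hgetset, hsetset, pvGG0, pvGG1, pvGG2, pvGG3, pvSD0, pvSD1, pvSD2, pvSD3, hi, hrow, List.getElem?_set_self, List.set_set]
    · exact pvCaseBlocked board i 2 [(i:Int), 2] player hi a b c (some dv) t hrow (Or.inr (Or.inr ⟨rfl, rfl⟩))

theorem pvCaseBlockedGen (board : List (List (Option Int))) (i : Nat) (cc : Int) (prev : List Int) (player : Int)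
    (hi : i < board.length) (hcc : cc = 0 ∨ cc = 1 ∨ cc = 2)
    (hlen : (cc + 1).toNat < board[i].length)
    (hblk : board[i].getD (cc + 1).toNat none ≠ none) :
    move_east board (i:Int) cc prev player = move_east_alt board (i:Int) cc prev player := by
  have hget : PySem.List.pyGet? board (i:Int) = some board[i] := by
    simp [PySem.List.pyGet?_natCast, List.getElem?_eq_getElem hi]
  obtain ⟨v, hv⟩ : ∃ v, board[i].getD (cc + 1).toNat none = some v := by
    rcases h : board[i].getD (cc + 1).toNat none with _ | v
    · exact absurd h hblk
    · exact ⟨v, rfl⟩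
  have hcellN : ∀ k : Nat, k < board[i].length → board[i].getD k none = some v →
      PySem.List.pyGet? board[i] (k : Int) = some (some v) := by
    intro k hk hvk
    have hk' : board[i][k] = some v := by
      simpa [List.getD_eq_getElem?_getD, List.getElem?_eq_getElem hk] using hvk
    rw [PySem.List.pyGet?_natCast, List.getElem?_eq_getElem hk, hk']
  rcases hcc with rfl | rfl | rfl
  · have hcell : PySem.List.pyGet? board[i] 1 = some (some v) := by
      rw [show (1:Int) = ((1:Nat):Int) from rfl]
      exact hcellN 1 (by simpa using hlen) (by simpa using hv)
    unfold move_east move_east_alt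
    rw [show PySem.List.pyRange 1 (4-0) 1 = [1,2,3] from by decide, pvMoveEastScanB]
    norm_num [pvMoveEastLoopA, hget, hcell]
  · have hcell : PySem.List.pyGet? board[i] 2 = some (some v) := by
      rw [show (2:Int) = ((2:Nat):Int) from rfl]
      exact hcellN 2 (by simpa using hlen) (by simpa using hv)
    unfold move_east move_east_alt
    rw [show PySem.List.pyRange 1 (4-1) 1 = [1,2] from by decide, pvMoveEastScanB]
    norm_num [pvMoveEastLoopA, hget, hcell]
  · have hcell : PySem.List.pyGet? board[i] 3 = some (some v) := by
      rw [show (3:Int) = ((3:Nat):Int) from rfl]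
      exact hcellN 3 (by simpa using hlen) (by simpa using hv)
    unfold move_east move_east_alt
    rw [show PySem.List.pyRange 1 (4-2) 1 = [1] from by decide, pvMoveEastScanB]
    norm_num [pvMoveEastLoopA, hget, hcell]

theorem pvRowFour (row : List (Option Int)) (h : 4 ≤ row.length) :
    ∃ a b c d t, row = a::b::c::d::t := by
  match row, h with
  | a::b::c::d::t, _ => exact ⟨a,b,c,d,t,rfl⟩

-- ===== VERDICT (by name: the statement is the Claim_ definition above) =====
theorem move_east_spec : Claim_equal_move_east := by
  intro board rc cc prev player _dom hpre
  unfold Spec_move_east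
  rcases hpre with h3 | ⟨hr0, hrlen, hc0, hc3, hdisj⟩
  · exact pvCaseHigh board rc cc prev player h3
  · lift rc to Nat using hr0 with i
    have hi : i < board.length := by exact_mod_cast hrlen
    have hgd : board.getD (i:Int).toNat [] = board[i] := by
      simp [List.getD_eq_getElem?_getD, List.getElem?_eq_getElem hi]
    have hcc : cc = 0 ∨ cc = 1 ∨ cc = 2 := by omega
    rcases hdisj with ⟨hlen, hblk⟩ | ⟨hlen4, rfl⟩
    · rw [hgd] at hlen hblk
      exact pvCaseBlockedGen board i cc prev player hi hcc hlen hblk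
    · obtain ⟨a, b, c, d, t, hrow⟩ := pvRowFour board[i] (by rw [← hgd]; exact hlen4)
      exact pvCaseMain board i cc player hi a b c d t hrow hcc
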